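-- pv_equiv track=rewrite | github.com/andrewshvv/findr | src/common/telegram.py | _revert_sentence
-- ===== SOURCE A (Python) =====
-- def _revert_sentence(sentence, original_text) -> str:
--     num_changed = 0
--     while sentence not in original_text:
--         sentence = sentence[:-1]
--         num_changed += 1
--
--     start_index = original_text.find(sentence)
--     end_index = start_index + len(sentence) + num_changed
--     original_sentence = original_text[start_index:end_index]
--
--     while original_text[end_index:end_index + 1] == "\n":
--         original_sentence += "\n"
--         end_index += 1
--
--     return original_sentence
-- ===== SOURCE B (Python) =====
-- def _revert_sentence(sentence, original_text) -> str:
--     # Binary search for the longest prefix length lo with sentence[:lo] in original_text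
--     # (the predicate is monotone: every prefix of a substring is a substring; lo=0 always works).
--     lo, hi = 0, len(sentence)
--     while lo < hi:
--         mid = (lo + hi + 1) // 2
--         if sentence[:mid] in original_text:
--             lo = mid
--         else:
--             hi = mid - 1
--     num_changed = len(sentence) - lo
--     sentence = sentence[:lo]
--
--     start_index = original_text.find(sentence)
--     end_index = start_index + len(sentence) + num_changed
--     original_sentence = original_text[start_index:end_index]
--
--     while original_text[end_index:end_index + 1] == "\n":
--         original_sentence += "\n"
--         end_index += 1
--
--     return original_sentence
-- ===== Notes on version B (the rewrite author's own statement) =====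
-- stated objective: faster
-- what changed: The one-char-at-a-time truncation loop is replaced by a binary search for the longest prefix of sentence that is a substring of original_text (the predicate is monotone); the reconstruction tail (find, span slice, trailing-newline extension) is unchanged.
import Mathlib
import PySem

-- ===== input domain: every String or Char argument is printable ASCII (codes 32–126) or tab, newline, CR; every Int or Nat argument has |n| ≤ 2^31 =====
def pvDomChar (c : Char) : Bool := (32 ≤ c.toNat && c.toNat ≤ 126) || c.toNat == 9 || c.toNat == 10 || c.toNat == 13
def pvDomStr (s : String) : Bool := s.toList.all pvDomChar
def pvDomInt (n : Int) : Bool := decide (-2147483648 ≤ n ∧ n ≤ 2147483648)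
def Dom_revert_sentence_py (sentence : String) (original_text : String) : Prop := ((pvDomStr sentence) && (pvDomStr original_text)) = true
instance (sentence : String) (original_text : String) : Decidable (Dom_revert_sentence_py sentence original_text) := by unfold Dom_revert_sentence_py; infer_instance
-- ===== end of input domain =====

-- B replaces A's one-char-at-a-time truncation loop with a binary search for the longest
-- matching prefix (objective: faster — O(log n) containment tests instead of O(n)).

-- ===== PORT A =====

-- trailing-newline extension loop, shared verbatim by A and B (both Pythons contain the identical
-- code):  while original_text[end_index:end_index+1] == "\n": original_sentence += "\n"; end_index += 1
-- end_index is ≥ 0 throughout in both programs (start_index ≥ 0), so it is tracked as a Nat; exact there.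
def pvNl (t : List Char) : Nat → List Char → Nat → List Char
  | 0, acc, _ => acc
  | fuel + 1, acc, e =>
    if PySem.List.slice t (some (e : Int)) (some ((e : Int) + 1)) = ['\n'] then
      pvNl t fuel (acc ++ ['\n']) (e + 1)
    else acc

-- the reconstruction tail after truncation: find, span slice, newline extension
-- (identical source text in A and B).  original_text.find(sentence) ≥ 0 here because the
-- truncated sentence is a substring, so .toNat is exact.
def pvTail (t : List Char) (s : List Char) (num : Nat) : List Char :=
  let start : Nat := (PySem.Chars.find t s).toNat
  let endIdx : Nat := start + s.length + num
  let orig := PySem.List.slice t (some (start : Int)) (some (endIdx : Int))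
  -- fuel t.length + 1 never runs out: each iteration needs a nonempty slice, so e < t.length
  pvNl t (t.length + 1) orig endIdx

-- A's truncation loop: while sentence not in original_text: sentence = sentence[:-1]; num += 1
-- (fuel s.length + 1 never runs out: each iteration drops a char, and [] is always a substring)
def pvTruncA (t : List Char) : Nat → List Char → Nat → List Char × Nat
  | 0, s, num => (s, num)
  | fuel + 1, s, num =>
    if PySem.Chars.isIn s t then (s, num)
    else pvTruncA t fuel s.dropLast (num + 1)

def revert_sentence_py (sentence : String) (original_text : String) : String :=
  let s := sentence.toList
  let t := original_text.toList
  let r := pvTruncA t (s.length + 1) s 0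
  String.ofList (pvTail t r.1 r.2)

-- ===== PORT B =====

-- binary search: largest lo with sentence[:lo] a substring of original_text
-- (lo, hi, mid are ≥ 0 throughout in Source B, so tracked as Nat; (lo+hi+1)//2 = Nat division there)
-- (fuel s.length + 1 never runs out: hi - lo strictly decreases each iteration, starting at s.length)
def pvBsearch (s t : List Char) : Nat → Nat → Nat → Nat
  | 0, lo, _ => lo
  | fuel + 1, lo, hi =>
    if lo < hi then
      if PySem.Chars.isIn (s.take ((lo + hi + 1) / 2)) t then
        pvBsearch s t fuel ((lo + hi + 1) / 2) hi
      else
        pvBsearch s t fuel lo ((lo + hi + 1) / 2 - 1)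
    else lo

def revert_sentence_py_alt (sentence : String) (original_text : String) : String :=
  let s := sentence.toList
  let t := original_text.toList
  let lo := pvBsearch s t (s.length + 1) 0 s.length
  let num := s.length - lo
  String.ofList (pvTail t (s.take lo) num)

-- ===== PRECONDITION & SPEC =====
def Spec_revert_sentence_py (sentence : String) (original_text : String) (out : String) : Prop := out = revert_sentence_py_alt sentence original_text
instance (sentence : String) (original_text : String) (out : String) : Decidable (Spec_revert_sentence_py sentence original_text out) := by unfold Spec_revert_sentence_py; infer_instance

-- ===== CLAIM (what is proved, stated in full; the proofs are below) =====
def Claim_equal_revert_sentence_py : Prop := ∀ (sentence : String) (original_text : String), Dom_revert_sentence_py sentence original_text → Spec_revert_sentence_py sentence original_text (revert_sentence_py sentence original_text)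

-- ===== LEMMAS AND PROOFS =====

-- the largest l ≤ m with s.take l a substring of t
def pvMaxP (s t : List Char) : Nat → Nat
  | 0 => 0
  | m + 1 => if PySem.Chars.isIn (s.take (m + 1)) t then m + 1 else pvMaxP s t m

theorem pvMaxP_le (s t : List Char) (m : Nat) : pvMaxP s t m ≤ m := by
  induction m with
  | zero => simp [pvMaxP]
  | succ m ih => simp only [pvMaxP]; split <;> omega

theorem pvMono (s t : List Char) {j k : Nat} (hjk : j ≤ k)
    (h : PySem.Chars.isIn (s.take k) t = true) : PySem.Chars.isIn (s.take j) t = true := by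
  rw [PySem.Chars.isIn_iff_infix] at h ⊢
  have hpre : s.take j <+: s.take k := by
    rw [show s.take j = (s.take k).take j by rw [List.take_take, Nat.min_eq_left hjk]]
    exact List.take_prefix _ _
  exact hpre.isInfix.trans h

theorem pvMaxP_isIn (s t : List Char) (m : Nat) :
    PySem.Chars.isIn (s.take (pvMaxP s t m)) t = true := by
  induction m with
  | zero => simp [pvMaxP, PySem.Chars.isIn_nil]
  | succ m ih => simp only [pvMaxP]; split <;> simp_all

theorem pvMaxP_not (s t : List Char) (m : Nat) :
    ∀ j, pvMaxP s t m < j → j ≤ m → ¬ PySem.Chars.isIn (s.take j) t = true := by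
  induction m with
  | zero => intro j h1 h2; omega
  | succ m ih =>
    intro j h1 h2
    simp only [pvMaxP] at h1
    by_cases hc : PySem.Chars.isIn (s.take (m + 1)) t = true
    · simp [hc] at h1; omega
    · simp [hc] at h1
      rcases Nat.lt_or_ge j (m + 1) with hj | hj
      · exact ih j h1 (by omega)
      · have : j = m + 1 := by omega
        subst this; exact hc

theorem pvMaxP_eq_of (s t : List Char) (m L : Nat) (hL : L ≤ m)
    (hin : PySem.Chars.isIn (s.take L) t = true)
    (hnot : ∀ j, L < j → j ≤ m → ¬ PySem.Chars.isIn (s.take j) t = true) :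
    pvMaxP s t m = L := by
  have h1 := pvMaxP_le s t m
  have h2 := pvMaxP_isIn s t m
  have h3 := pvMaxP_not s t m
  rcases Nat.lt_trichotomy (pvMaxP s t m) L with h | h | h
  · exact absurd hin (h3 L h hL)
  · exact h
  · exact absurd h2 (hnot _ h h1)

theorem pvTruncA_take (s t : List Char) :
    ∀ m, m ≤ s.length → ∀ fuel, m < fuel → ∀ n,
      pvTruncA t fuel (s.take m) n = (s.take (pvMaxP s t m), n + (m - pvMaxP s t m)) := by
  intro m
  induction m with
  | zero =>
    rintro _ (_ | fuel) hf n
    · omega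
    · simp [pvTruncA, PySem.Chars.isIn_nil, pvMaxP]
  | succ m ih =>
    rintro hm (_ | fuel) hf n
    · omega
    · by_cases hc : PySem.Chars.isIn (s.take (m + 1)) t = true
      · simp [pvTruncA, hc, pvMaxP]
      · have hdl : (s.take (m + 1)).dropLast = s.take m := by
          rw [List.dropLast_eq_take, List.take_take]
          congr 1
          rw [List.length_take]
          omega
        simp only [pvTruncA]
        rw [if_neg hc, hdl, ih (by omega) fuel (by omega) (n + 1)]
        have := pvMaxP_le s t m
        simp only [pvMaxP]
        rw [if_neg hc]
        simp only [Prod.mk.injEq]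
        exact ⟨trivial, by omega⟩

theorem pvBsearch_eq (s t : List Char) :
    ∀ fuel lo hi, hi - lo < fuel → PySem.Chars.isIn (s.take lo) t = true →
      lo ≤ hi → hi ≤ s.length →
      (∀ j, hi < j → j ≤ s.length → ¬ PySem.Chars.isIn (s.take j) t = true) →
      pvBsearch s t fuel lo hi = pvMaxP s t s.length := by
  intro fuel
  induction fuel with
  | zero => intro lo hi hd _ hlh _ _; omega
  | succ fuel ih =>
    intro lo hi hd hin hlh hhs hnot
    simp only [pvBsearch]
    by_cases h : lo < hi
    · rw [if_pos h]
      have hmid : lo + 1 ≤ (lo + hi + 1) / 2 ∧ (lo + hi + 1) / 2 ≤ hi := by omega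
      by_cases hc : PySem.Chars.isIn (s.take ((lo + hi + 1) / 2)) t = true
      · rw [if_pos hc]
        exact ih _ hi (by omega) hc (by omega) hhs hnot
      · rw [if_neg hc]
        refine ih lo _ (by omega) hin (by omega) (by omega) ?_
        intro j h1 h2 hj
        rcases Nat.lt_or_ge hi j with hj2 | hj2
        · exact hnot j hj2 h2 hj
        · exact hc (pvMono s t (by omega) hj)
    · rw [if_neg h]
      have : lo = hi := by omega
      subst this
      exact (pvMaxP_eq_of s t s.length lo hhs hin hnot).symm

-- ===== VERDICT (by name: the statement is the Claim_ definition above) =====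
theorem revert_sentence_py_spec : Claim_equal_revert_sentence_py := by
  intro sentence original_text _
  simp only [Spec_revert_sentence_py, revert_sentence_py, revert_sentence_py_alt]
  set s := sentence.toList
  set t := original_text.toList
  have hA : pvTruncA t (s.length + 1) s 0 = (s.take (pvMaxP s t s.length), 0 + (s.length - pvMaxP s t s.length)) := by
    have := pvTruncA_take s t s.length le_rfl (s.length + 1) (by omega) 0
    rwa [List.take_length] at this
  have hB : pvBsearch s t (s.length + 1) 0 s.length = pvMaxP s t s.length := by
    refine pvBsearch_eq s t (s.length + 1) 0 s.length (by omega) ?_ (by omega) le_rfl ?_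
    · simp [PySem.Chars.isIn_nil]
    · intro j h1 h2; omega
  rw [hA, hB]
  simp
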